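-- pv_equiv track=rewrite | github.com/jdolanski/aoc_2019 | day4.py | validate_B
-- ===== SOURCE A (Python) =====
-- def validate_B(n_l):
--     last_seen = n_l[0]
--     repeat_stack = [0]
--     for n in n_l[1:]:
--         if last_seen > n:
--             return False
--         if last_seen != n:
--             repeat_stack.append(0)
--         else:
--             repeat_stack[-1] += 1
--         last_seen = n
--
--     return 1 in set(repeat_stack)
-- ===== SOURCE B (Python) =====
-- def validate_B(n_l):
--     # Pass 1: any adjacent decrease -> False.
--     if any(a > b for a, b in zip(n_l, n_l[1:])):
--         return False
--     # Pass 2: run-length encode and look for a run of exactly 2.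
--     runs = []
--     i = 0
--     while i < len(n_l):
--         j = i
--         while j < len(n_l) and n_l[j] == n_l[i]:
--             j += 1
--         runs.append(j - i)
--         i = j
--     return 2 in runs
-- ===== Notes on version B (the rewrite author's own statement) =====
-- stated objective: alternative
-- what changed: B replaces A's single stateful pass (last_seen plus a repeat_stack of run-lengths-minus-one, early return on decrease, final '1 in set') by two independent passes: an adjacent-pair scan for monotonicity, then an index-based run-length encoding checked for a run of exactly 2.
-- outside the precondition, e.g. on validate_B([]): A raises IndexError, B returns False
import Mathlib
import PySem

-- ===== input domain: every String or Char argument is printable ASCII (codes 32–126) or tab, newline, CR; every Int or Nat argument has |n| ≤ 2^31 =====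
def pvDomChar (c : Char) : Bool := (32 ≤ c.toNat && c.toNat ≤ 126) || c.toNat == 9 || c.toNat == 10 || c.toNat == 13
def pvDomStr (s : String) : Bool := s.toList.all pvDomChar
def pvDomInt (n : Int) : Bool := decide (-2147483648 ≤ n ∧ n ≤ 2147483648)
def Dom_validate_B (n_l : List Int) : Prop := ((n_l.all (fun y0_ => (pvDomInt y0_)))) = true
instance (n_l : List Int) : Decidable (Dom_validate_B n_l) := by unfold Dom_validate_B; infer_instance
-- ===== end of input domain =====

-- B replaces A's single stateful pass by two independent passes (adjacent-pair scan, then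
-- run-length encoding); objective: alternative decomposition, same O(n) cost.

-- ===== PORT A =====
-- one loop iteration of A: state none = "already returned False"; some (last_seen, repeat_stack)
def stepA (st : Option (Int × List Int)) (n : Int) : Option (Int × List Int) :=
  match st with
  | none => none
  | some (last_seen, repeat_stack) =>
    if last_seen > n then none                                   -- return False
    else if last_seen ≠ n then some (n, repeat_stack ++ [(0 : Int)])   -- repeat_stack.append(0)
    else                                                          -- repeat_stack[-1] += 1
      some (n, repeat_stack.dropLast ++ [repeat_stack.getLast?.getD 0 + 1])
      -- getD 0 is unreachable: repeat_stack is never empty (starts as a singleton zero, only grows)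

def validate_B (n_l : List Int) : Bool :=
  match n_l with
  | [] => false   -- unreachable under Pre_: Python raises IndexError reading the first element
  | first :: rest =>
    match rest.foldl stepA (some (first, [(0 : Int)])) with
    | none => false
    | some (_, repeat_stack) => PySem.Set.contains (PySem.Set.ofList repeat_stack) 1

-- ===== PORT B =====
-- the inner 'while j < len and n_l[j] == n_l[i]' scan: (run length of x, rest of the list)
def pvRun (x : Int) : List Int → Nat × List Int
  | [] => (1, [])
  | y :: ys => if y = x then ((pvRun x ys).1 + 1, (pvRun x ys).2) else (1, y :: ys)

-- the outer 'while i < len(n_l)' loop; the fuel is the loop bound 'i < len(n_l)' itself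
def pvRunsF : Nat → List Int → List Nat
  | _, [] => []
  | 0, _ :: _ => []          -- unreachable: fuel starts at the list length
  | f + 1, x :: xs => (pvRun x xs).1 :: pvRunsF f (pvRun x xs).2

def pvRuns (l : List Int) : List Nat := pvRunsF l.length l

def validate_B_alt (n_l : List Int) : Bool :=
  if (n_l.zip (n_l.drop 1)).any (fun p => p.1 > p.2) then false
  else (pvRuns n_l).contains 2

-- ===== PRECONDITION & SPEC =====
-- Pre_ excludes only the empty list, on which A raises IndexError reading the first element.
def Pre_validate_B (n_l : List Int) : Prop := n_l ≠ []
instance (n_l : List Int) : Decidable (Pre_validate_B n_l) := by unfold Pre_validate_B; infer_instance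
def pvWitness_validate_B : List Int := ([1, 2, 2, 3])

def Spec_validate_B (n_l : List Int) (out : Bool) : Prop := out = validate_B_alt n_l
instance (n_l : List Int) (out : Bool) : Decidable (Spec_validate_B n_l out) := by unfold Spec_validate_B; infer_instance

-- ===== CLAIM (what is proved, stated in full; the proofs are below) =====
def Claim_equal_validate_B : Prop := ∀ (n_l : List Int), Dom_validate_B n_l → Pre_validate_B n_l → Spec_validate_B n_l (validate_B n_l)

-- ===== LEMMAS AND PROOFS =====

theorem pvRun_len (x : Int) (l : List Int) : (pvRun x l).2.length ≤ l.length := by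
  induction l with
  | nil => simp [pvRun]
  | cons y ys ih =>
    by_cases h : y = x <;> simp [pvRun, h]
    omega

theorem pvRunsF_fuel : ∀ (f g : Nat) (l : List Int), l.length ≤ f → l.length ≤ g →
    pvRunsF f l = pvRunsF g l := by
  intro f
  induction f with
  | zero =>
    intro g l hf _
    have : l = [] := List.eq_nil_of_length_eq_zero (Nat.le_zero.mp hf)
    subst this; cases g <;> rfl
  | succ f ih =>
    intro g l hf hg
    cases l with
    | nil => cases g <;> rfl
    | cons x xs =>
      cases g with
      | zero => simp at hg
      | succ g =>
        simp only [pvRunsF]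
        have hlen := pvRun_len x xs
        simp only [List.length_cons, Nat.succ_le_succ_iff] at hf hg
        exact congrArg _ (ih g _ (le_trans hlen hf) (le_trans hlen hg))

theorem pvRuns_cons (x : Int) (xs : List Int) :
    pvRuns (x :: xs) = (pvRun x xs).1 :: pvRuns (pvRun x xs).2 := by
  unfold pvRuns
  simp only [List.length_cons, pvRunsF]
  exact congrArg _ (pvRunsF_fuel xs.length _ _ (pvRun_len x xs) le_rfl)

theorem foldl_stepA_none (l : List Int) : l.foldl stepA none = none := by
  induction l with
  | nil => rfl
  | cons y ys ih => simpa [stepA] using ih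

-- if some adjacent pair decreases, A's loop returns False (state none)
theorem foldl_stepA_dec (l : List Int) : ∀ (x : Int) (st : List Int),
    ((x :: l).zip l).any (fun p => decide (p.1 > p.2)) = true →
    l.foldl stepA (some (x, st)) = none := by
  induction l with
  | nil => intro x st h; simp at h
  | cons y ys ih =>
    intro x st h
    simp only [List.zip_cons_cons, List.any_cons, Bool.or_eq_true, decide_eq_true_eq] at h
    by_cases hxy : x > y
    · simp [List.foldl_cons, stepA, hxy, foldl_stepA_none]
    · have hrest : ((y :: ys).zip ys).any (fun p => decide (p.1 > p.2)) = true := by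
        rcases h with h | h
        · omega
        · exact h
      by_cases hne : x ≠ y <;>
        simp only [List.foldl_cons, stepA, if_neg hxy, hne, ite_not, if_false] <;>
        exact ih y _ hrest

-- if no adjacent pair decreases, A's surviving stack is exactly the run lengths minus one
theorem foldl_stepA_runs (l : List Int) : ∀ (x : Int) (S : List Int) (k : Int),
    ((x :: l).zip l).any (fun p => decide (p.1 > p.2)) = false →
    ∃ z, l.foldl stepA (some (x, S ++ [k])) =
      some (z, (S ++ [k + ((pvRun x l).1 - 1)]) ++
        (pvRuns (pvRun x l).2).map (fun c : Nat => (c : Int) - 1)) := by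
  induction l with
  | nil =>
    intro x S k _
    exact ⟨x, by simp [pvRun, pvRuns, pvRunsF]⟩
  | cons y ys ih =>
    intro x S k h
    simp only [List.zip_cons_cons, List.any_cons, Bool.or_eq_false_iff,
      decide_eq_false_iff_not] at h
    obtain ⟨hxy, hrest⟩ := h
    by_cases hne : x = y
    · -- equal: repeat_stack[-1] += 1, run continues
      subst hne
      obtain ⟨z, hz⟩ := ih x S (k + 1) hrest
      refine ⟨z, ?_⟩
      simp only [List.foldl_cons, stepA, if_neg hxy]
      simp only [ne_eq, not_true_eq_false, if_false, List.dropLast_concat,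
        List.getLast?_concat, Option.getD_some]
      rw [hz]
      have h1 : (pvRun x (x :: ys)).1 = (pvRun x ys).1 + 1 := by simp [pvRun]
      have h2 : (pvRun x (x :: ys)).2 = (pvRun x ys).2 := by simp [pvRun]
      rw [h1, h2]
      push_cast
      ring_nf
    · -- strictly smaller: new run starts, append 0
      obtain ⟨z, hz⟩ := ih y (S ++ [k]) 0 hrest
      refine ⟨z, ?_⟩
      simp only [List.foldl_cons, stepA, if_neg hxy, ne_eq, hne, not_false_eq_true, if_true]
      rw [hz]
      have hrun : pvRun x (y :: ys) = (1, y :: ys) := by simp [pvRun, Ne.symm hne]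
      rw [hrun, pvRuns_cons]
      simp [List.append_assoc]

theorem mem_map_sub_one (runs : List Nat) :
    ((1 : Int) ∈ runs.map (fun c : Nat => (c : Int) - 1)) ↔ (2 : Nat) ∈ runs := by
  induction runs with
  | nil => simp
  | cons c cs ih =>
    simp only [List.map_cons, List.mem_cons, ih]
    constructor
    · rintro (h | h)
      · left; omega
      · right; exact h
    · rintro (h | h)
      · left; omega
      · right; exact h

theorem final_mem (runs : List Nat) :
    PySem.Set.contains (PySem.Set.ofList (runs.map (fun c : Nat => (c : Int) - 1))) 1 =
      runs.contains 2 := by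
  by_cases h : (2 : Nat) ∈ runs
  · have h1 : (1 : Int) ∈ runs.map (fun c : Nat => (c : Int) - 1) := (mem_map_sub_one runs).mpr h
    simp [PySem.Set.mem_ofList, h1, h]
  · have h1 : (1 : Int) ∉ runs.map (fun c : Nat => (c : Int) - 1) := fun hc => h ((mem_map_sub_one runs).mp hc)
    simp [PySem.Set.mem_ofList, h1, h]

-- ===== VERDICT (by name: the statement is the Claim_ definition above) =====
theorem validate_B_spec : Claim_equal_validate_B := by
  intro n_l _ hpre
  unfold Spec_validate_B
  cases n_l with
  | nil => exact absurd rfl hpre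
  | cons x rest =>
    simp only [validate_B, validate_B_alt]
    have hd : List.drop 1 (x :: rest) = rest := rfl
    rcases hb : ((x :: rest).zip rest).any (fun p => decide (p.1 > p.2)) with _ | _
    · obtain ⟨z, hz⟩ := foldl_stepA_runs rest x [] 0 hb
      simp only [List.nil_append] at hz
      rw [hz]
      simp only [hd, hb, Bool.false_eq_true, if_false]
      have hstack : ([(0 : Int) + ((pvRun x rest).1 - 1)] ++
          (pvRuns (pvRun x rest).2).map (fun c : Nat => (c : Int) - 1)) =
          (pvRuns (x :: rest)).map (fun c : Nat => (c : Int) - 1) := by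
        rw [pvRuns_cons]; simp
      rw [hstack]
      exact final_mem _
    · rw [foldl_stepA_dec rest x _ hb]
      simp [hd, hb]
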